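-- pv_equiv track=rewrite | github.com/funasshi/AtCoder | abc129d.py | light_count
-- ===== SOURCE A (Python) =====
-- def light_count(masu):
--     h = len(masu)
--     w = len(masu[0])
--
--     count_map = [[0]*w for i in range(h)]
--     for i, retu in enumerate(masu):
--         for j, item in enumerate(retu):
--             if j == 0:
--                 if item == '.':
--                     count_map[i][j] = 1
--             elif item == '.':
--                 count_map[i][j] = count_map[i][j-1]+1
--         for j in range(w-1, -1, -1):
--             if j == w-1 or count_map[i][j] == 0:
--                 continue
--             else:
--                 if count_map[i][j+1] == 0:
--                     continue
--                 else:
--                     count_map[i][j] = count_map[i][j+1]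
--     return count_map
-- ===== SOURCE B (Python) =====
-- def light_count(masu):
--     w = len(masu[0])
--     res = []
--     for row in masu:
--         out = []
--         run = 0
--         for c in row[:w]:
--             if c == '.':
--                 run += 1
--             else:
--                 out.extend([run] * run)
--                 out.append(0)
--                 run = 0
--         out.extend([run] * run)
--         out.extend([0] * (w - len(out)))
--         res.append(out)
--     return res
-- ===== Notes on version B (the rewrite author's own statement) =====
-- stated objective: simpler
-- what changed: A fills each row with a forward running-count pass into a preallocated grid and then a second backward pass propagating the run total leftwards; B does one pass per row tracking the current '.'-run length and emitting each run's total length (plus a 0 separator) directly, padding with zeros to width w.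
import Mathlib
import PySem

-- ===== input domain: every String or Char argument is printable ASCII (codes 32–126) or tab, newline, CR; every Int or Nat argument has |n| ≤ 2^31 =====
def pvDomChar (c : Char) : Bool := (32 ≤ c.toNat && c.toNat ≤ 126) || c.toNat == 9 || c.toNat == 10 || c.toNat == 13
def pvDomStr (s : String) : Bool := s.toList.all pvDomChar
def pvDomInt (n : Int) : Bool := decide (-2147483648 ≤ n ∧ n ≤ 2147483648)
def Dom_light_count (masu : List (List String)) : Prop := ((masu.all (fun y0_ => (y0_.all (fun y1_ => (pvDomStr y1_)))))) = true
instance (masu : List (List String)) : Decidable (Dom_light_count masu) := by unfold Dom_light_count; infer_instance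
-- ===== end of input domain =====

-- B replaces A's forward-count pass plus backward run-total propagation pass by a single
-- per-row scan that emits each '.'-run's total length directly (objective: simpler).

-- ===== PORT A =====
-- forward pass: for j, item in enumerate(retu): writes count_map row in place
def pvA_fwdStep (cm : List Int) (j : Nat) (item : String) : List Int :=
  if j = 0 then (if item = "." then cm.set 0 1 else cm)
  else if item = "." then cm.set j (cm.getD (j - 1) 0 + 1) else cm

def pvA_fwd : List Int → List String → Nat → List Int
  | cm, [], _ => cm
  | cm, item :: rest, j => pvA_fwd (pvA_fwdStep cm j item) rest (j + 1)

-- backward pass body: for j in range(w-1, -1, -1)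
def pvA_bwdStep (w : Nat) (cm : List Int) (j : Nat) : List Int :=
  if j = w - 1 ∨ cm.getD j 0 = 0 then cm
  else if cm.getD (j + 1) 0 = 0 then cm
  else cm.set j (cm.getD (j + 1) 0)

-- range(w-1, -1, -1) is (List.range w).reverse
def light_count (masu : List (List String)) : List (List Int) :=
  let w := (masu.headD []).length
  masu.map (fun retu =>
    List.foldl (pvA_bwdStep w) (pvA_fwd (List.replicate w 0) retu 0) (List.range w).reverse)

-- ===== PORT B =====
-- loop body over row[:w], state = (out, run)
def pvB_step (s : List Int × Nat) (c : String) : List Int × Nat :=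
  if c = "." then (s.1, s.2 + 1)
  else (s.1 ++ List.replicate s.2 (s.2 : Int) ++ [0], 0)

def light_count_alt (masu : List (List String)) : List (List Int) :=
  let w := (masu.headD []).length
  masu.map (fun row =>
    let s := (row.take w).foldl pvB_step ([], 0)
    let out := s.1 ++ List.replicate s.2 (s.2 : Int)
    out ++ List.replicate (w - out.length) 0)

-- ===== PRECONDITION & SPEC =====
-- Pre_ excludes exactly the inputs where A raises IndexError: the empty grid
-- (masu[0] fails) and grids with a '.' at a column index ≥ len(masu[0]).
def Pre_light_count (masu : List (List String)) : Prop :=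
  masu ≠ [] ∧ ∀ row ∈ masu, ∀ c ∈ row.drop (masu.headD []).length, c ≠ "."
instance (masu : List (List String)) : Decidable (Pre_light_count masu) := by
  unfold Pre_light_count; infer_instance

def pvWitness_light_count : List (List String) := [[".", "#", "."], ["."]]

def Spec_light_count (masu : List (List String)) (out : List (List Int)) : Prop :=
  out = light_count_alt masu
instance (masu : List (List String)) (out : List (List Int)) : Decidable (Spec_light_count masu out) := by
  unfold Spec_light_count; infer_instance

-- ===== CLAIM (what is proved, stated in full; the proofs are below) =====
def Claim_equal_light_count : Prop := ∀ (masu : List (List String)), Dom_light_count masu → Pre_light_count masu → Spec_light_count masu (light_count masu)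

-- ===== LEMMAS AND PROOFS =====

-- forward-pass result, structurally: pvF prev cells, prev = previous cell's count
def pvF : Int → List String → List Int
  | _, [] => []
  | p, c :: rest => if c = "." then (p + 1) :: pvF (p + 1) rest else 0 :: pvF 0 rest

-- final row, structurally: pvG run cells, run = length of the pending '.'-run
def pvG : Nat → List String → List Int
  | r, [] => List.replicate r (r : Int)
  | r, c :: rest => if c = "." then pvG (r + 1) rest
      else List.replicate r (r : Int) ++ 0 :: pvG 0 rest

theorem length_pvF (cells : List String) : ∀ p : Int, (pvF p cells).length = cells.length := by
  induction cells with
  | nil => intro p; rfl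
  | cons c rest ih => intro p; simp only [pvF]; split <;> simp [ih]

theorem length_pvG (cells : List String) : ∀ r : Nat, (pvG r cells).length = r + cells.length := by
  induction cells with
  | nil => intro r; simp [pvG]
  | cons c rest ih => intro r; simp only [pvG]; split <;> simp [ih] <;> omega

-- B's foldl produces pvG
theorem foldB (cells : List String) : ∀ (acc : List Int) (run : Nat),
    (cells.foldl pvB_step (acc, run)).1
      ++ List.replicate (cells.foldl pvB_step (acc, run)).2
          ((cells.foldl pvB_step (acc, run)).2 : Int)
      = acc ++ pvG run cells := by
  induction cells with
  | nil => intro acc run; simp [pvG]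
  | cons c rest ih =>
    intro acc run
    simp only [List.foldl_cons, pvB_step, pvG]
    by_cases h : c = "."
    · simp only [if_pos h]; exact ih acc (run + 1)
    · simp only [if_neg h]; rw [ih]; simp

theorem fwd_skip (cells : List String) : ∀ (cm : List Int) (j : Nat),
    (∀ c ∈ cells, c ≠ ".") → pvA_fwd cm cells j = cm := by
  induction cells with
  | nil => intros; rfl
  | cons c rest ih =>
    intro cm j h
    have hc : c ≠ "." := h c (by simp)
    simp only [pvA_fwd, pvA_fwdStep, if_neg hc]
    rw [show (if j = 0 then cm else cm) = cm from by split <;> rfl]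
    exact ih cm (j + 1) (fun d hd => h d (by simp [hd]))

theorem fwd_append (a : List String) : ∀ (b : List String) (cm : List Int) (j : Nat),
    pvA_fwd cm (a ++ b) j = pvA_fwd (pvA_fwd cm a j) b (j + a.length) := by
  induction a with
  | nil => intros; simp [pvA_fwd]
  | cons c rest ih =>
    intro b cm j
    simp only [List.cons_append, pvA_fwd, ih]
    congr 1
    simp
    omega

theorem set_append_len (pre : List Int) : ∀ (t : List Int) (x v : Int),
    (pre ++ x :: t).set pre.length v = pre ++ v :: t := by
  induction pre with
  | nil => intros; rfl
  | cons a pre ih => intro t x v; simp [List.set, ih]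

theorem getD_append_last (pre : List Int) : ∀ (l : List Int), pre ≠ [] →
    (pre ++ l).getD (pre.length - 1) 0 = pre.getLastD 0 := by
  induction pre with
  | nil => intro l h; exact absurd rfl h
  | cons a pre ih =>
    intro l _
    cases pre with
    | nil => rfl
    | cons b pre' =>
      have := ih l (by simp)
      simpa [List.getD] using this

-- main forward-pass characterisation
theorem fwd_go (cells : List String) : ∀ (pre : List Int) (m : Nat),
    cells.length ≤ m →
    pvA_fwd (pre ++ List.replicate m 0) cells pre.length
      = pre ++ pvF (pre.getLastD 0) cells ++ List.replicate (m - cells.length) 0 := by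
  induction cells with
  | nil => intro pre m _; simp [pvA_fwd, pvF]
  | cons c rest ih =>
    intro pre m hm
    obtain ⟨m', rfl⟩ : ∃ m', m = m' + 1 := ⟨m - 1, by simp at hm; omega⟩
    have hrepl : List.replicate (m' + 1) (0:Int) = 0 :: List.replicate m' 0 := rfl
    have hrest : rest.length ≤ m' := by simp at hm; omega
    simp only [pvA_fwd, pvA_fwdStep, hrepl]
    by_cases hc : c = "."
    · by_cases hp : pre = []
      · subst hp hc
        simp only [List.nil_append, if_pos rfl, List.set]
        have := ih [1] m' hrest
        simp only [List.length_cons, List.length_nil] at this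
        simpa [pvF, this] using (by simpa using ih [1] m' hrest)
      · have hj : pre.length ≠ 0 := by simpa using hp
        rw [if_neg hj, if_pos hc, getD_append_last pre _ hp, set_append_len]
        have := ih (pre ++ [pre.getLastD 0 + 1]) m' hrest
        simp only [List.length_append, List.length_cons, List.length_nil,
          List.getLastD_concat, List.append_assoc, List.cons_append, List.nil_append] at this ⊢
        rw [this]
        simp [pvF, if_pos hc, List.append_assoc]
    · have hstep : (if pre.length = 0 then (if c = "." then (pre ++ 0 :: List.replicate m' 0).set 0 1 else pre ++ 0 :: List.replicate m' 0) else if c = "." then (pre ++ 0 :: List.replicate m' 0).set pre.length ((pre ++ 0 :: List.replicate m' 0).getD (pre.length - 1) 0 + 1) else pre ++ 0 :: List.replicate m' 0) = pre ++ 0 :: List.replicate m' 0 := by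
        split <;> simp [hc]
      rw [hstep]
      have := ih (pre ++ [0]) m' hrest
      simp only [List.length_append, List.length_cons, List.length_nil,
        List.getLastD_concat, List.append_assoc, List.cons_append, List.nil_append] at this ⊢
      rw [this]
      simp [pvF, if_neg hc, List.append_assoc]

theorem getD_append_left (l m : List Int) (n : Nat) (h : n < l.length) :
    (l ++ m).getD n 0 = l.getD n 0 := by
  simp [List.getD, List.getElem?_append_left h]

theorem getD_append_right (l m : List Int) (n : Nat) (h : l.length ≤ n) :
    (l ++ m).getD n 0 = m.getD (n - l.length) 0 := by
  simp [List.getD, List.getElem?_append_right h]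

theorem take_succ_getD (l : List Int) (k : Nat) (h : k < l.length) :
    l.take (k + 1) = l.take k ++ [l.getD k 0] := by
  rw [List.take_add_one]; simp [List.getD, List.getElem?_eq_getElem h]

theorem drop_getD_cons (l : List Int) (k : Nat) (h : k < l.length) :
    l.drop k = l.getD k 0 :: l.drop (k + 1) := by
  rw [List.drop_eq_getElem_cons h]; simp [List.getD, List.getElem?_eq_getElem h]

theorem take_getD (l : List Int) (k n : Nat) (h : k < n) :
    (l.take n).getD k 0 = l.getD k 0 := by
  simp [List.getD, List.getElem?_take, if_pos h]

-- backward-pass invariant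
theorem bwd_inv (F Gf : List Int) (w : Nat) (hF : F.length = w) (hG : Gf.length = w)
    (H : ∀ j < w, (if j = w - 1 ∨ F.getD j 0 = 0 then F.getD j 0
          else if Gf.getD (j + 1) 0 = 0 then F.getD j 0 else Gf.getD (j + 1) 0) = Gf.getD j 0) :
    ∀ k ≤ w, List.foldl (pvA_bwdStep w) (F.take k ++ Gf.drop k) (List.range k).reverse = Gf := by
  intro k
  induction k with
  | zero => intro _; simp
  | succ k ih =>
    intro hk1
    have hk : k < w := hk1
    have hlen1 : (F.take (k + 1)).length = k + 1 := by simp [hF]; omega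
    have a1 : (F.take (k + 1) ++ Gf.drop (k + 1)).getD k 0 = F.getD k 0 := by
      rw [getD_append_left _ _ _ (by omega), take_getD _ _ _ (by omega)]
    have a2 : (F.take (k + 1) ++ Gf.drop (k + 1)).getD (k + 1) 0 = Gf.getD (k + 1) 0 := by
      rw [getD_append_right _ _ _ (by omega), hlen1]
      simp [List.getD, List.getElem?_drop]
    have hdec : F.take (k + 1) ++ Gf.drop (k + 1) = F.take k ++ F.getD k 0 :: Gf.drop (k + 1) := by
      rw [take_succ_getD F k (by omega)]; simp
    have hdrop : Gf.drop k = Gf.getD k 0 :: Gf.drop (k + 1) := drop_getD_cons Gf k (by omega)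
    have hset : ∀ v : Int, (F.take (k + 1) ++ Gf.drop (k + 1)).set k v = F.take k ++ v :: Gf.drop (k + 1) := by
      intro v
      have hlk : (F.take k).length = k := by simp [hF]; omega
      have h2 := set_append_len (F.take k) (Gf.drop (k + 1)) (F.getD k 0) v
      rw [hlk] at h2
      rw [hdec, h2]
    have Hk := H k hk
    have hstep : pvA_bwdStep w (F.take (k + 1) ++ Gf.drop (k + 1)) k = F.take k ++ Gf.drop k := by
      unfold pvA_bwdStep
      rw [a1, a2]
      split
      · rw [hdec, hdrop]
        rw [if_pos (by assumption)] at Hk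
        rw [Hk]
      · split
        · rw [hdec, hdrop]
          rw [if_neg (by assumption), if_pos (by assumption)] at Hk
          rw [Hk]
        · rw [hset, hdrop]
          rw [if_neg (by assumption), if_neg (by assumption)] at Hk
          rw [Hk]
    rw [show (List.range (k + 1)).reverse = k :: (List.range k).reverse from by simp [List.range_succ],
      List.foldl_cons, hstep]
    exact ih (by omega)

theorem getD_map_range (f : Nat → Int) (n j : Nat) (h : j < n) :
    ((List.range n).map f).getD j 0 = f j := by
  simp [List.getD, List.getElem?_map, List.getElem?_range h]

theorem getD_replicate_any (c : Int) (m i : Nat) :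
    (List.replicate m c).getD i 0 = if i < m then c else 0 := by
  simp only [List.getD, List.getElem?_replicate]
  split <;> rfl

theorem dropWhile_head_not (p : String → Bool) (l : List String) :
    ∀ x rest, l.dropWhile p = x :: rest → p x = false := by
  induction l with
  | nil => intro x rest h; simp at h
  | cons a l ih =>
    intro x rest h
    rw [List.dropWhile_cons] at h
    by_cases ha : p a
    · rw [if_pos ha] at h; exact ih x rest h
    · rw [if_neg ha] at h; cases h; simpa using ha

theorem pvF_dots (k : Nat) : ∀ (p : Int) (tail : List String),
    pvF p (List.replicate k "." ++ tail)
      = (List.range k).map (fun i : Nat => p + (i : Int) + 1) ++ pvF (p + (k : Int)) tail := by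
  induction k with
  | zero => intro p tail; simp
  | succ k ih =>
    intro p tail
    rw [List.replicate_succ, List.cons_append]
    show pvF p ("." :: (List.replicate k "." ++ tail)) = _
    rw [show pvF p ("." :: (List.replicate k "." ++ tail))
        = (p + 1) :: pvF (p + 1) (List.replicate k "." ++ tail) from by simp [pvF]]
    rw [ih (p + 1) tail, List.range_succ_eq_map]
    rw [List.map_cons, List.map_map, List.cons_append]
    refine congrArg₂ _ (by push_cast; ring) (congrArg₂ _ ?_ ?_)
    · apply List.map_congr_left; intro i _; simp only [Function.comp_apply]; push_cast; ring
    · congr 1; push_cast; ring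

theorem pvG_dots (k : Nat) : ∀ (r : Nat) (tail : List String),
    pvG r (List.replicate k "." ++ tail) = pvG (r + k) tail := by
  induction k with
  | zero => intro r tail; simp
  | succ k ih =>
    intro r tail
    rw [List.replicate_succ, List.cons_append]
    rw [show pvG r ("." :: (List.replicate k "." ++ tail))
        = pvG (r + 1) (List.replicate k "." ++ tail) from by simp [pvG]]
    rw [ih (r + 1) tail]
    congr 1
    omega

-- the pointwise relation between the two row representations
theorem getD_cons_succ' (a : Int) (l : List Int) (i : Nat) :
    (a :: l).getD (i + 1) 0 = l.getD i 0 := rfl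

theorem Hmain (n : Nat) : ∀ (cells : List String), cells.length = n → ∀ (w : Nat), cells.length ≤ w →
    ∀ j < w,
      (if j = w - 1 ∨ (pvF 0 cells ++ List.replicate (w - cells.length) 0).getD j 0 = 0 then
          (pvF 0 cells ++ List.replicate (w - cells.length) 0).getD j 0
        else if (pvG 0 cells ++ List.replicate (w - cells.length) 0).getD (j + 1) 0 = 0 then
          (pvF 0 cells ++ List.replicate (w - cells.length) 0).getD j 0
        else (pvG 0 cells ++ List.replicate (w - cells.length) 0).getD (j + 1) 0)
      = (pvG 0 cells ++ List.replicate (w - cells.length) 0).getD j 0 := by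
  induction n using Nat.strong_induction_on with
  | _ n IH =>
  intro cells hn w hw j hj
  obtain ⟨k, tail, hsplit, htail⟩ : ∃ k tail, cells = List.replicate k "." ++ tail ∧
      (tail = [] ∨ ∃ x rest, tail = x :: rest ∧ x ≠ ".") := by
    refine ⟨(cells.takeWhile (fun c => c == ".")).length, cells.dropWhile (fun c => c == "."), ?_, ?_⟩
    · conv_lhs => rw [← List.takeWhile_append_dropWhile (p := fun c => c == ".") (l := cells)]
      congr 1
      apply List.eq_replicate_of_mem
      intro b hb
      have := List.mem_takeWhile_imp hb
      simpa using this
    · cases hd : cells.dropWhile (fun c => c == ".") with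
      | nil => exact Or.inl rfl
      | cons x rest =>
        refine Or.inr ⟨x, rest, rfl, ?_⟩
        have := dropWhile_head_not _ cells x rest hd
        simpa using this
  subst hsplit
  rcases htail with rfl | ⟨x, rest, rfl, hx⟩
  · -- cells = replicate k "." : one run to the end
    simp only [List.append_nil] at hn hw hj ⊢
    simp only [List.length_replicate] at hn hw
    rw [show pvF 0 (List.replicate k ".") = (List.range k).map (fun i : Nat => 0 + (i : Int) + 1) from by
        have := pvF_dots k 0 []
        simpa [pvF] using this]
    rw [show pvG 0 (List.replicate k ".") = List.replicate k ((k : Nat) : Int) from by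
        have := pvG_dots k 0 []
        simpa [pvG] using this]
    simp only [List.length_replicate]
    have hF : ∀ i : Nat, (((List.range k).map (fun i : Nat => 0 + (i : Int) + 1))
        ++ List.replicate (w - k) 0).getD i 0 = if i < k then (i : Int) + 1 else 0 := by
      intro i
      by_cases hik : i < k
      · rw [getD_append_left _ _ _ (by simpa using hik), getD_map_range _ _ _ hik, if_pos hik]
        ring
      · rw [getD_append_right _ _ _ (by simpa using hik), getD_replicate_any, if_neg hik]
        split <;> rfl
    have hG : ∀ i : Nat, ((List.replicate k ((k : Nat) : Int))
        ++ List.replicate (w - k) 0).getD i 0 = if i < k then (k : Int) else 0 := by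
      intro i
      by_cases hik : i < k
      · rw [getD_append_left _ _ _ (by simpa using hik), getD_replicate_any, if_pos hik]
      · rw [getD_append_right _ _ _ (by simpa using hik), getD_replicate_any, if_neg hik]
        split <;> rfl
    simp only [hF, hG]
    by_cases hjk : j < k
    · have hk1 : (1:Int) ≤ (j:Int) + 1 := by omega
      rw [if_pos hjk, if_pos hjk]
      by_cases hlast : j = w - 1
      · rw [if_pos (Or.inl hlast)]
        have : j + 1 = k := by omega
        omega
      · rw [if_neg (by push_neg; exact ⟨hlast, by omega⟩)]
        by_cases hjk1 : j + 1 < k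
        · rw [if_pos hjk1, if_neg (by omega)]
        · rw [if_neg hjk1, if_pos rfl]
          omega
    · rw [if_neg hjk, if_neg hjk, if_pos (Or.inr rfl)]
  · -- cells = replicate k "." ++ x :: rest : a run, a separator, and the remainder
    have hxlen : (List.replicate k "." ++ x :: rest).length = k + 1 + rest.length := by
      simp; omega
    have hrn : rest.length < n := by omega
    have hkw : k + 1 + rest.length ≤ w := by omega
    rw [pvF_dots, pvG_dots]
    rw [show pvF (0 + (k : Int)) (x :: rest) = 0 :: pvF 0 rest from by simp [pvF, hx]]
    rw [show pvG (0 + k) (x :: rest) = List.replicate k ((k : Nat) : Int) ++ 0 :: pvG 0 rest from by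
      simp [pvG, hx]]
    have hlenF2 : (pvF 0 rest).length = rest.length := length_pvF rest 0
    have hlenG2 : (pvG 0 rest).length = rest.length := by simpa using length_pvG rest 0
    set Z := List.replicate (w - (List.replicate k "." ++ x :: rest).length) (0 : Int) with hZ
    have hZ' : Z = List.replicate ((w - (k + 1)) - rest.length) (0 : Int) := by
      rw [hZ]; congr 1; simp; omega
    set F2 := pvF 0 rest ++ Z with hF2
    set G2 := pvG 0 rest ++ Z with hG2
    have hFa : ∀ i : Nat, (((List.range k).map (fun i : Nat => 0 + (i : Int) + 1))
        ++ (0 :: pvF 0 rest) ++ Z).getD i 0 =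
        if i < k then (i : Int) + 1 else if i = k then 0 else F2.getD (i - (k + 1)) 0 := by
      intro i
      rw [List.append_assoc]
      by_cases hik : i < k
      · rw [getD_append_left _ _ _ (by simpa using hik), getD_map_range _ _ _ hik, if_pos hik]
        ring
      · rw [getD_append_right _ _ _ (by simpa using hik), if_neg hik]
        have hlm : ((List.range k).map (fun i : Nat => 0 + (i : Int) + 1)).length = k := by simp
        rw [hlm]
        by_cases hik2 : i = k
        · rw [if_pos hik2, hik2]; simp
        · rw [if_neg hik2]
          obtain ⟨i', rfl⟩ : ∃ i', i = k + 1 + i' := ⟨i - (k + 1), by omega⟩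
          rw [show k + 1 + i' - k = i' + 1 from by omega, List.cons_append, getD_cons_succ']
          congr 1
          omega
    have hGb : ∀ i : Nat, ((List.replicate k ((k : Nat) : Int) ++ 0 :: pvG 0 rest) ++ Z).getD i 0 =
        if i < k then (k : Int) else if i = k then 0 else G2.getD (i - (k + 1)) 0 := by
      intro i
      rw [List.append_assoc]
      by_cases hik : i < k
      · rw [getD_append_left _ _ _ (by simpa using hik), getD_replicate_any, if_pos hik, if_pos hik]
      · rw [getD_append_right _ _ _ (by simpa using hik), if_neg hik, List.length_replicate]
        by_cases hik2 : i = k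
        · rw [if_pos hik2, hik2]; simp
        · rw [if_neg hik2]
          obtain ⟨i', rfl⟩ : ∃ i', i = k + 1 + i' := ⟨i - (k + 1), by omega⟩
          rw [show k + 1 + i' - k = i' + 1 from by omega, List.cons_append, getD_cons_succ']
          congr 1
          omega
    rw [hxlen] at hZ
    simp only [hFa, hGb]
    by_cases hjk : j < k
    · rw [if_pos hjk, if_pos hjk]
      have hnotlast : ¬ (j = w - 1) := by omega
      rw [if_neg (by push_neg; exact ⟨hnotlast, by omega⟩)]
      by_cases hjk1 : j + 1 < k
      · rw [if_pos hjk1, if_neg (by omega)]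
      · have : j + 1 = k := by omega
        rw [if_neg hjk1, if_pos this, if_pos rfl]
        omega
    · by_cases hjk2 : j = k
      · rw [if_neg hjk, if_pos hjk2, if_neg hjk, if_pos hjk2, if_pos (Or.inr rfl)]
      · rw [if_neg hjk, if_neg hjk2, if_neg hjk, if_neg hjk2]
        have hj1a : ¬ (j + 1 < k) := by omega
        have hj1b : ¬ (j + 1 = k) := by omega
        rw [if_neg hj1a, if_neg hj1b]
        obtain ⟨j', rfl⟩ : ∃ j', j = k + 1 + j' := ⟨j - (k + 1), by omega⟩
        rw [show k + 1 + j' - (k + 1) = j' from by omega,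
          show k + 1 + j' + 1 - (k + 1) = j' + 1 from by omega]
        have hIH := IH rest.length hrn rest rfl (w - (k + 1)) (by omega) j' (by omega)
        rw [← hZ'] at hIH
        have hcond : (k + 1 + j' = w - 1) = (j' = w - (k + 1) - 1) := by
          apply propext; constructor <;> (intro; omega)
        simp only [hcond]
        exact hIH
theorem row_eq (w : Nat) (retu : List String)
    (hrow : ∀ c ∈ retu.drop w, c ≠ ".") :
    List.foldl (pvA_bwdStep w) (pvA_fwd (List.replicate w 0) retu 0) (List.range w).reverse
      = pvG 0 (retu.take w) ++ List.replicate (w - (retu.take w).length) 0 := by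
  have hlen : (retu.take w).length ≤ w := by simp
  have h1 : pvA_fwd (List.replicate w 0) retu 0
      = pvF 0 (retu.take w) ++ List.replicate (w - (retu.take w).length) 0 := by
    conv_lhs => rw [← List.take_append_drop w retu]
    rw [fwd_append, fwd_skip _ _ _ hrow]
    have := fwd_go (retu.take w) [] w hlen
    simpa using this
  rw [h1]
  have hF : (pvF 0 (retu.take w) ++ List.replicate (w - (retu.take w).length) 0).length = w := by
    simp [length_pvF]
  have hG : (pvG 0 (retu.take w) ++ List.replicate (w - (retu.take w).length) 0).length = w := by
    have := length_pvG (retu.take w) 0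
    simp [this]
  have H := Hmain (retu.take w).length (retu.take w) rfl w hlen
  have hinv := bwd_inv _ _ w hF hG H w le_rfl
  rw [List.take_of_length_le (le_of_eq hF), List.drop_eq_nil_of_le (le_of_eq hG),
    List.append_nil] at hinv
  exact hinv

theorem altRow (w : Nat) (row : List String) :
    (let s := (row.take w).foldl pvB_step ([], 0)
     let out := s.1 ++ List.replicate s.2 (s.2 : Int)
     out ++ List.replicate (w - out.length) 0)
    = pvG 0 (row.take w) ++ List.replicate (w - (row.take w).length) 0 := by
  have hfold := foldB (row.take w) [] 0
  simp only [List.nil_append] at hfold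
  simp only [hfold]
  have hl : (pvG 0 (row.take w)).length = (row.take w).length := by
    simpa using length_pvG (row.take w) 0
  rw [hl]

-- ===== VERDICT (by name: the statement is the Claim_ definition above) =====
theorem light_count_spec : Claim_equal_light_count := by
  intro masu _ hpre
  unfold Spec_light_count light_count light_count_alt
  obtain ⟨hne, hrows⟩ := hpre
  apply List.map_congr_left
  intro retu hmem
  rw [row_eq (masu.headD []).length retu (hrows retu hmem)]
  exact (altRow (masu.headD []).length retu).symm
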